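-- pv_equiv track=rewrite | github.com/IrisDin/pythonpractice | pythonpractice.py | never_win
-- ===== SOURCE A (Python) =====
-- def never_win(match_tuples):
--     '''
--     Arguments:
--         match_tuples: a list of tuples that are size 2 representing matches
--         played. Each tuple is in the form (string, boolean), which represents
--         the champion played for the match and whether the match was won
--         (True for won, False for lost). Assume match_tuples is not empty.
--
--     Returns: a list of the unique champions that have no matches won in
--         match_tuples, sorted in alphabetical order. Returns an empty list if
--         there are no champions with zero matches won.
--     '''
--     # creating the new win set and lose set of character
--     win = set()
--     lose = set()
--     for tuple in match_tuples:
--         # losing the game by using the character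
--         if tuple[1] is False:
--             lose.add(tuple[0])
--         # wining the game by using the character
--         else:
--             win.add(tuple[0])
--         # return the sorted never_win charcter
--         # sorted by alphabetical order
--     return sorted(list(lose - win))
-- ===== SOURCE B (Python) =====
-- def never_win(match_tuples):
--     # Sort matches by champion, then scan consecutive groups once:
--     # a champion is emitted iff its whole group lost; output is already sorted.
--     ms = sorted(match_tuples, key=lambda t: t[0])
--     out = []
--     i = 0
--     n = len(ms)
--     while i < n:
--         champ = ms[i][0]
--         lost_all = True
--         while i < n and ms[i][0] == champ:
--             if ms[i][1] is not False:
--                 lost_all = False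
--             i += 1
--         if lost_all:
--             out.append(champ)
--     return out
-- ===== Notes on version B (the rewrite author's own statement) =====
-- stated objective: alternative
-- what changed: A buckets matches into win/lose hash sets and sorts their set difference; B instead sorts the matches by champion first and makes one grouped scan over consecutive runs, emitting a champion iff its whole run lost, so no sets and no final sort of results are needed.
import Mathlib
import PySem

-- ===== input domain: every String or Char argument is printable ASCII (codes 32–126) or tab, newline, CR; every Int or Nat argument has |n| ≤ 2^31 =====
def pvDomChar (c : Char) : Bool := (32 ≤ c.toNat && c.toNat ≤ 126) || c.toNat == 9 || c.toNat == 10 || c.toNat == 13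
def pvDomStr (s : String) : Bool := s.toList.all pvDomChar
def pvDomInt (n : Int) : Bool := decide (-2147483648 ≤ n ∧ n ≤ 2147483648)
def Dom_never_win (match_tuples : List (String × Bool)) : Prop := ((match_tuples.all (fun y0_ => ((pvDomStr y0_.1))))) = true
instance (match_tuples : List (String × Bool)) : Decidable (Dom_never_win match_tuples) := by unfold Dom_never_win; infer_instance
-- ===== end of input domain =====

-- B replaces A's win/lose sets + set difference + final sort by sort-the-matches-first
-- then one grouped scan over consecutive runs (alternative algorithm; similar cost).

-- ===== PORT A =====
def never_win (match_tuples : List (String × Bool)) : List String :=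
  let st := match_tuples.foldl
    (fun (st : PySem.Set String × PySem.Set String) t =>
      if t.2 = false then (st.1, PySem.Set.add st.2 t.1)
      else (PySem.Set.add st.1 t.1, st.2))
    (PySem.Set.empty, PySem.Set.empty)
  PySem.List.sorted (PySem.Set.diff st.2 st.1) (fun x => x) false

-- ===== PORT B =====
-- the inner 'while i < n and ms[i][0] == champ' loop: consume the run of matches of
-- champion c, updating lost_all; returns (lost_all, remaining suffix)
def pvConsume (c : String) (la : Bool) : List (String × Bool) → Bool × List (String × Bool)
  | [] => (la, [])
  | (c', b) :: rest =>
      if c' = c then pvConsume c (la && (b == false)) rest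
      else (la, (c', b) :: rest)

lemma pvConsume_len (c : String) (la : Bool) (l : List (String × Bool)) :
    (pvConsume c la l).2.length ≤ l.length := by
  induction l generalizing la with
  | nil => simp [pvConsume]
  | cons t rest ih =>
    obtain ⟨c', b⟩ := t
    simp only [pvConsume]
    split
    · exact le_trans (ih _) (Nat.le_succ _)
    · simp

-- the outer 'while i < n' loop; the head of the run (the inner loop's first
-- iteration, with lost_all = True) is unrolled for structural termination
def pvScan : List (String × Bool) → List String
  | [] => []
  | (c, b) :: rest =>
      let r := pvConsume c (true && (b == false)) rest
      (if r.1 then [c] else []) ++ pvScan r.2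
termination_by l => l.length
decreasing_by
  simp only [List.length_cons]
  exact Nat.lt_succ_of_le (pvConsume_len _ _ _)

def never_win_alt (match_tuples : List (String × Bool)) : List String :=
  pvScan (PySem.List.sorted match_tuples (fun t => t.1) false)

-- ===== PRECONDITION & SPEC =====
def Spec_never_win (match_tuples : List (String × Bool)) (out : List String) : Prop := out = never_win_alt match_tuples
instance (match_tuples : List (String × Bool)) (out : List String) : Decidable (Spec_never_win match_tuples out) := by unfold Spec_never_win; infer_instance

-- ===== CLAIM (what is proved, stated in full; the proofs are below) =====
def Claim_equal_never_win : Prop := ∀ (match_tuples : List (String × Bool)), Dom_never_win match_tuples → Spec_never_win match_tuples (never_win match_tuples)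

-- ===== LEMMAS AND PROOFS =====

lemma pvConsume_eq (c : String) (la : Bool) (l : List (String × Bool)) :
    pvConsume c la l =
      (la && (l.takeWhile (fun t => t.1 == c)).all (fun t => t.2 == false),
       l.dropWhile (fun t => t.1 == c)) := by
  induction l generalizing la with
  | nil => simp [pvConsume]
  | cons t rest ih =>
    obtain ⟨c', b⟩ := t
    simp only [pvConsume]
    by_cases h : c' = c
    · subst h
      rw [if_pos rfl, ih]
      simp [Bool.and_assoc]
    · rw [if_neg h]
      simp [h]

-- on a list whose run of fst = c has been dropped, every remaining fst exceeds c
lemma pv_dropWhile_gt (c : String) (l : List (String × Bool))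
    (hpw : l.Pairwise (fun a b => a.1 ≤ b.1)) (hlb : ∀ z ∈ l, c ≤ z.1) :
    ∀ z ∈ l.dropWhile (fun t => t.1 == c), c < z.1 := by
  induction l with
  | nil => simp
  | cons a t ih =>
    rw [List.dropWhile_cons]
    obtain ⟨ha, hpt⟩ := List.pairwise_cons.mp hpw
    split
    · exact ih hpt (fun z hz => hlb z (List.mem_cons_of_mem _ hz))
    · rename_i hne
      have hane : a.1 ≠ c := by simpa using hne
      have hca : c < a.1 := lt_of_le_of_ne (hlb a List.mem_cons_self) (Ne.symm hane)
      intro z hz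
      rcases List.mem_cons.mp hz with rfl | hz'
      · exact hca
      · exact hca.trans_le (ha z hz')

-- full characterisation of the grouped scan on a list sorted by champion:
-- its output is strictly increasing and contains exactly the champions all of
-- whose matches in the list are losses
lemma pvScan_spec : ∀ (l : List (String × Bool)), l.Pairwise (fun a b => a.1 ≤ b.1) →
    (∀ x, x ∈ pvScan l ↔ ((x, false) ∈ l ∧ (x, true) ∉ l)) ∧
      (pvScan l).Pairwise (· < ·) := by
  intro l
  induction l using pvScan.induct with
  | case1 => intro _; simp [pvScan]
  | case2 c b rest r ih =>
    intro hs
    obtain ⟨hc_le, hrpw⟩ := List.pairwise_cons.mp hs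
    have hre : r = ((true && (b == false)) && (rest.takeWhile (fun t => t.1 == c)).all (fun t => t.2 == false),
        rest.dropWhile (fun t => t.1 == c)) := pvConsume_eq c (true && (b == false)) rest
    have hre2 : r.2 = rest.dropWhile (fun t => t.1 == c) := by rw [hre]
    rw [hre2] at ih
    have hdppw : (rest.dropWhile (fun t => t.1 == c)).Pairwise (fun a b => a.1 ≤ b.1) :=
      List.Pairwise.sublist (List.dropWhile_sublist _) hrpw
    obtain ⟨ihmem, ihpw⟩ := ih hdppw
    have hgt : ∀ z ∈ rest.dropWhile (fun t => t.1 == c), c < z.1 :=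
      pv_dropWhile_gt c rest hrpw (fun z hz => hc_le z hz)
    have htkc : ∀ z ∈ rest.takeWhile (fun t => t.1 == c), z.1 = c := by
      intro z hz
      have := List.mem_takeWhile_imp hz
      simpa using this
    have hrest : rest = rest.takeWhile (fun t => t.1 == c) ++ rest.dropWhile (fun t => t.1 == c) :=
      (List.takeWhile_append_dropWhile).symm
    have hscan : pvScan ((c, b) :: rest) =
        (if ((b == false) && (rest.takeWhile (fun t => t.1 == c)).all (fun t => t.2 == false)) then [c] else []) ++
          pvScan (rest.dropWhile (fun t => t.1 == c)) := by
      rw [pvScan]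
      simp only [pvConsume_eq, Bool.true_and]
    clear ih hre hdppw hs
    generalize htk : List.takeWhile (fun t => t.1 == c) rest = tk at htkc hrest hscan
    generalize hdp : List.dropWhile (fun t => t.1 == c) rest = dp at hgt hrest hscan ihmem ihpw
    rw [hscan]
    have hcnotdp : ∀ bb : Bool, (c, bb) ∉ dp := by
      intro bb hmem
      exact absurd rfl (ne_of_lt (hgt _ hmem))
    constructor
    · intro x
      simp only [List.mem_append, ihmem]
      by_cases hx : x = c
      · subst hx
        constructor
        · intro hmem
          rcases hmem with hmem | hmem
          · -- x came from the if, so the whole run lost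
            have hcond : ((b == false) && tk.all (fun t => t.2 == false)) = true := by
              by_contra hc2
              rw [Bool.not_eq_true] at hc2
              rw [hc2] at hmem; simp at hmem
            obtain ⟨hb, hall⟩ := Bool.and_eq_true_iff.mp hcond
            have hb' : b = false := by simpa using hb
            have hall' : ∀ z ∈ tk, z.2 = false := by
              rw [List.all_eq_true] at hall
              intro z hz; simpa using hall z hz
            refine ⟨?_, ?_⟩
            · rw [hb']; exact List.mem_cons_self
            · intro hin
              rcases List.mem_cons.mp hin with h | h
              · have hbt : b = true := (congrArg Prod.snd h).symm
                rw [hb'] at hbt; simp at hbt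
              · rw [hrest] at h
                rcases List.mem_append.mp h with h | h
                · have := hall' _ h; simp at this
                · exact hcnotdp true h
          · exact absurd hmem.1 (hcnotdp false)
        · intro ⟨hin, hnot⟩
          left
          have hb : b = false := by
            cases b with
            | false => rfl
            | true => exact absurd (List.mem_cons_self) hnot
          have hall : tk.all (fun t => t.2 == false) = true := by
            rw [List.all_eq_true]
            intro z hz
            have hz1 := htkc z hz
            cases hzb : z.2 with
            | false => simp
            | true =>
              exfalso
              apply hnot
              have hzz : z = (x, true) := by
                obtain ⟨z1, z2⟩ := z
                simp_all
              exact hzz ▸ List.mem_cons_of_mem _ (hrest ▸ List.mem_append_left _ hz)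
          rw [hb, hall]
          simp
      · -- x ≠ c : x's matches all live in dp
        have hnottk : ∀ bb : Bool, (x, bb) ∉ tk := by
          intro bb hmem
          exact hx (htkc _ hmem)
        constructor
        · intro hmem
          rcases hmem with hmem | hmem
          · exfalso; revert hmem; split <;> simp [hx]
          · refine ⟨List.mem_cons_of_mem _ (hrest ▸ List.mem_append_right _ hmem.1), ?_⟩
            intro hin
            rcases List.mem_cons.mp hin with h | h
            · exact hx (congrArg Prod.fst h)
            · rw [hrest] at h
              rcases List.mem_append.mp h with h | h
              · exact hnottk true h
              · exact hmem.2 h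
        · intro ⟨hin, hnot⟩
          right
          rcases List.mem_cons.mp hin with h | h
          · exact absurd (congrArg Prod.fst h) hx
          · rw [hrest] at h
            rcases List.mem_append.mp h with h | h
            · exact absurd h (hnottk false)
            · exact ⟨h, fun hin' => hnot (List.mem_cons_of_mem _ (hrest ▸ List.mem_append_right _ hin'))⟩
    · apply List.pairwise_append.mpr
      refine ⟨?_, ihpw, ?_⟩
      · split <;> simp
      · intro a ha x hx
        have hxdp : (x, false) ∈ dp := ((ihmem x).mp hx).1
        have hcx : c < x := hgt _ hxdp
        have hac : a = c := by revert ha; split <;> simp_all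
        exact hac ▸ hcx

-- A's fold: membership of the win and lose sets
lemma pv_fold_mem (l : List (String × Bool)) (w lo : PySem.Set String) :
    (∀ x, x ∈ (l.foldl (fun (st : PySem.Set String × PySem.Set String) t =>
        if t.2 = false then (st.1, PySem.Set.add st.2 t.1)
        else (PySem.Set.add st.1 t.1, st.2)) (w, lo)).1 ↔ (x ∈ w ∨ (x, true) ∈ l)) ∧
    (∀ x, x ∈ (l.foldl (fun (st : PySem.Set String × PySem.Set String) t =>
        if t.2 = false then (st.1, PySem.Set.add st.2 t.1)
        else (PySem.Set.add st.1 t.1, st.2)) (w, lo)).2 ↔ (x ∈ lo ∨ (x, false) ∈ l)) := by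
  induction l generalizing w lo with
  | nil => simp
  | cons t rest ih =>
    obtain ⟨c, b⟩ := t
    simp only [List.foldl_cons]
    cases b with
    | false =>
      rw [if_pos (show ((c, false) : String × Bool).2 = false from rfl)]
      obtain ⟨ih1, ih2⟩ := ih w (PySem.Set.add lo c)
      constructor
      · intro x; rw [ih1 x]; simp
      · intro x; rw [ih2 x]
        simp only [PySem.Set.mem_add, List.mem_cons, Prod.mk.injEq]
        tauto
    | true =>
      rw [if_neg (show ¬((c, true) : String × Bool).2 = false from by simp)]
      obtain ⟨ih1, ih2⟩ := ih (PySem.Set.add w c) lo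
      constructor
      · intro x; rw [ih1 x]
        simp only [PySem.Set.mem_add, List.mem_cons, Prod.mk.injEq]
        tauto
      · intro x; rw [ih2 x]; simp

lemma pv_fold_nodup (l : List (String × Bool)) (w lo : PySem.Set String)
    (hw : w.Nodup) (hl : lo.Nodup) :
    (l.foldl (fun (st : PySem.Set String × PySem.Set String) t =>
        if t.2 = false then (st.1, PySem.Set.add st.2 t.1)
        else (PySem.Set.add st.1 t.1, st.2)) (w, lo)).2.Nodup := by
  induction l generalizing w lo with
  | nil => exact hl
  | cons t rest ih =>
    simp only [List.foldl_cons]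
    by_cases ht : t.2 = false
    · rw [if_pos ht]; exact ih w (PySem.Set.add lo t.1) hw (PySem.Set.nodup_add lo t.1 hl)
    · rw [if_neg ht]; exact ih (PySem.Set.add w t.1) lo (PySem.Set.nodup_add w t.1 hw) hl

-- ===== VERDICT (by name: the statement is the Claim_ definition above) =====
theorem never_win_spec : Claim_equal_never_win := by
  intro mts _
  unfold Spec_never_win never_win never_win_alt
  set f := fun (st : PySem.Set String × PySem.Set String) (t : String × Bool) =>
      if t.2 = false then (st.1, PySem.Set.add st.2 t.1) else (PySem.Set.add st.1 t.1, st.2) with hf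
  set st := mts.foldl f (PySem.Set.empty, PySem.Set.empty) with hst
  set ms := PySem.List.sorted mts (fun t => t.1) false with hms
  obtain ⟨hwin, hlose⟩ := pv_fold_mem mts PySem.Set.empty PySem.Set.empty
  have hmemA : ∀ x, x ∈ PySem.Set.diff st.2 st.1 ↔ ((x, false) ∈ mts ∧ (x, true) ∉ mts) := by
    intro x
    rw [PySem.Set.mem_diff, hst, hlose x, hwin x]
    simp [PySem.Set.empty]
  have hmspw : ms.Pairwise (fun a b => a.1 ≤ b.1) :=
    PySem.List.sorted_pairwise mts (fun t => t.1)
  obtain ⟨hmemB, hpwB⟩ := pvScan_spec ms hmspw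
  have hmsperm : ms.Perm mts := PySem.List.sorted_perm mts (fun t => t.1) false
  have hmemB' : ∀ x, x ∈ pvScan ms ↔ ((x, false) ∈ mts ∧ (x, true) ∉ mts) := by
    intro x
    rw [hmemB x, hmsperm.mem_iff, hmsperm.mem_iff]
  have hAnd : (PySem.Set.diff st.2 st.1).Nodup :=
    PySem.Set.nodup_diff st.2 st.1 (hst ▸ pv_fold_nodup mts _ _ List.nodup_nil List.nodup_nil)
  have hBnd : (pvScan ms).Nodup := hpwB.imp (fun h => ne_of_lt h)
  have hperm : (pvScan ms).Perm (PySem.Set.diff st.2 st.1) := by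
    rw [List.perm_ext_iff_of_nodup hBnd hAnd]
    intro x; rw [hmemA x, hmemB' x]
  exact PySem.List.sorted_eq_of_perm_of_pairwise_lt (PySem.Set.diff st.2 st.1) (pvScan ms) (fun x => x) hperm hpwB
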